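-- pv_equiv track=rewrite | github.com/SafidyPatrickRas/TP_SEO | scripts/minify_views.py | split_php_blocks
-- ===== SOURCE A (Python) =====
-- from typing import Iterable, List, Tuple
--
-- def split_php_blocks(text: str) -> List[Tuple[str, str]]:
--     parts: List[Tuple[str, str]] = []
--     pos = 0
--     while True:
--         start = text.find("<?", pos)
--         if start == -1:
--             parts.append(("html", text[pos:]))
--             break
--         parts.append(("html", text[pos:start]))
--         end = text.find("?>", start + 2)
--         if end == -1:
--             parts.append(("php", text[start:]))
--             break
--         parts.append(("php", text[start : end + 2]))
--         pos = end + 2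
--     return parts
-- ===== SOURCE B (Python) =====
-- from typing import Iterable, List, Tuple
--
-- def split_php_blocks(text: str) -> List[Tuple[str, str]]:
--     # One-pass character state machine instead of repeated str.find + slicing.
--     parts: List[Tuple[str, str]] = []
--     buf: List[str] = []
--     mode = "html"
--     i = 0
--     n = len(text)
--     while i < n:
--         if mode == "html" and text[i] == "<" and i + 1 < n and text[i + 1] == "?":
--             parts.append(("html", "".join(buf)))
--             buf = ["<", "?"]
--             mode = "php"
--             i += 2
--         elif mode == "php" and text[i] == "?" and i + 1 < n and text[i + 1] == ">":
--             buf.append("?")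
--             buf.append(">")
--             parts.append(("php", "".join(buf)))
--             buf = []
--             mode = "html"
--             i += 2
--         else:
--             buf.append(text[i])
--             i += 1
--     parts.append((mode, "".join(buf)))
--     return parts
-- ===== Notes on version B (the rewrite author's own statement) =====
-- stated objective: alternative
-- what changed: A repeatedly calls str.find for the PHP open and close tags and slices the text by absolute positions; B is a single left-to-right character state machine (html/php mode) that buffers characters and emits a block at each mode switch.
import Mathlib
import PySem

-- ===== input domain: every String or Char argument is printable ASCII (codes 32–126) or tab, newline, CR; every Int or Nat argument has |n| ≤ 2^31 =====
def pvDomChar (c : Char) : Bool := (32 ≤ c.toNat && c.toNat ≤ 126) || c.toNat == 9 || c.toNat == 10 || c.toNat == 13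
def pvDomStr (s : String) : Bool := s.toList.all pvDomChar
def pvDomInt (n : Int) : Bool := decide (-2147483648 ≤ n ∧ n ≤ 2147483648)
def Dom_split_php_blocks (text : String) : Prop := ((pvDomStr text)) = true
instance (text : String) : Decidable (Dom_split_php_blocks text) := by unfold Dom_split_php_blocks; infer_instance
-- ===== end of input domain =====

-- B replaces A's repeated str.find + slicing loop with a single character-by-character
-- state machine (alternative decomposition, same output).

-- ===== PORT A =====
-- A's while-loop: pos cursor + text.find; fuel = text.length + 1 only makes the
-- recursion structural (pos advances by ≥ 4 each iteration, so it never runs out).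
def pvLoopA (text : String) : Int → Nat → List (String × String)
  | _, 0 => []
  | pos, fuel + 1 =>
    let start := PySem.Str.findFrom text "<?" pos
    if start = -1 then [("html", PySem.Str.slice text (some pos) none)]
    else
      let e := PySem.Str.findFrom text "?>" (start + 2)
      if e = -1 then
        [("html", PySem.Str.slice text (some pos) (some start)),
         ("php", PySem.Str.slice text (some start) none)]
      else
        ("html", PySem.Str.slice text (some pos) (some start)) ::
        ("php", PySem.Str.slice text (some start) (some (e + 2))) ::
        pvLoopA text (e + 2) fuel

def split_php_blocks (text : String) : List (String × String) :=
  pvLoopA text 0 (text.length + 1)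

-- ===== PORT B =====
-- B's state machine: mode "html"/"php" becomes two mutually recursive functions,
-- buf is kept reversed (Python appends at the end; here we cons and reverse at emit).
mutual
def pvGoHtml : List Char → List Char → List (String × String)
  | [], buf => [("html", String.ofList buf.reverse)]
  | [c], buf => pvGoHtml [] (c :: buf)
  | c :: c2 :: rest, buf =>
    if c = '<' ∧ c2 = '?' then
      ("html", String.ofList buf.reverse) :: pvGoPhp rest ['?', '<']
    else pvGoHtml (c2 :: rest) (c :: buf)
termination_by cs _ => cs.length
def pvGoPhp : List Char → List Char → List (String × String)
  | [], buf => [("php", String.ofList buf.reverse)]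
  | [c], buf => pvGoPhp [] (c :: buf)
  | c :: c2 :: rest, buf =>
    if c = '?' ∧ c2 = '>' then
      ("php", String.ofList (('>' :: '?' :: buf).reverse)) :: pvGoHtml rest []
    else pvGoPhp (c2 :: rest) (c :: buf)
termination_by cs _ => cs.length
end

def split_php_blocks_alt (text : String) : List (String × String) :=
  pvGoHtml text.toList []

-- ===== PRECONDITION & SPEC =====
def Spec_split_php_blocks (text : String) (out : List (String × String)) : Prop := out = split_php_blocks_alt text
instance (text : String) (out : List (String × String)) : Decidable (Spec_split_php_blocks text out) := by unfold Spec_split_php_blocks; infer_instance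

-- ===== CLAIM (what is proved, stated in full; the proofs are below) =====
def Claim_equal_split_php_blocks : Prop := ∀ (text : String), Dom_split_php_blocks text → Spec_split_php_blocks text (split_php_blocks text)

-- ===== LEMMAS AND PROOFS =====

theorem pv_find_of_prefix (cs sub : List Char) (h : sub <+: cs) :
    PySem.Chars.find cs sub = 0 := by
  have h0 : 0 ≤ PySem.Chars.find cs sub := (PySem.Chars.find_nonneg_iff cs sub).2 h.isInfix
  obtain ⟨-, hmin⟩ := PySem.Chars.find_spec h0
  by_contra hne
  have hpos : 0 < (PySem.Chars.find cs sub).toNat := by omega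
  exact hmin 0 hpos (by simpa using h)

theorem pv_find_cons (c : Char) (cs sub : List Char) (h : ¬ sub <+: (c :: cs)) :
    PySem.Chars.find (c :: cs) sub =
      if PySem.Chars.find cs sub = -1 then -1 else PySem.Chars.find cs sub + 1 := by
  by_cases hcs : PySem.Chars.find cs sub = -1
  · rw [if_pos hcs]
    rw [PySem.Chars.find_eq_neg_one_iff] at hcs ⊢
    rw [List.infix_cons_iff]
    tauto
  · rw [if_neg hcs]
    have hf0 : 0 ≤ PySem.Chars.find cs sub := by
      have := PySem.Chars.neg_one_le_find cs sub; omega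
    have hinf : sub <:+: cs := (PySem.Chars.find_nonneg_iff cs sub).1 hf0
    have hg0 : 0 ≤ PySem.Chars.find (c :: cs) sub :=
      (PySem.Chars.find_nonneg_iff _ sub).2 (List.infix_cons_iff.2 (Or.inr hinf))
    obtain ⟨hfp, hfmin⟩ := PySem.Chars.find_spec hf0
    obtain ⟨hgp, hgmin⟩ := PySem.Chars.find_spec hg0
    set f := PySem.Chars.find cs sub with hf
    set g := PySem.Chars.find (c :: cs) sub with hg
    have hg1 : 1 ≤ g.toNat := by
      by_contra hlt
      have : g.toNat = 0 := by omega
      rw [this] at hgp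
      exact h (by simpa using hgp)
    have hdg : List.drop g.toNat (c :: cs) = List.drop (g.toNat - 1) cs := by
      conv_lhs => rw [show g.toNat = (g.toNat - 1) + 1 from by omega]
      exact List.drop_succ_cons
    rw [hdg] at hgp
    have h1 : ¬ (g.toNat - 1 < f.toNat) := fun hlt => hfmin _ hlt hgp
    have hfp' : sub <+: List.drop (f.toNat + 1) (c :: cs) := by
      rwa [List.drop_succ_cons]
    have h2 : ¬ (f.toNat + 1 < g.toNat) := fun hlt => hgmin _ hlt hfp'
    omega

theorem pv_drop_of_prefix (cs sub t : List Char) (i : Nat) (h : List.drop i cs = sub ++ t) :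
    t = List.drop (i + sub.length) cs := by
  calc t = List.drop sub.length (sub ++ t) := by simp
    _ = List.drop sub.length (List.drop i cs) := by rw [← h]
    _ = List.drop (i + sub.length) cs := by rw [List.drop_drop]

theorem pv_find_two_ne (cs : List Char) (a b : Char) (hlen : cs.length ≤ 1) :
    PySem.Chars.find cs [a, b] = -1 := by
  rw [PySem.Chars.find_eq_neg_one_iff]
  intro hinf
  have := hinf.length_le
  simp at this
  omega

theorem pv_str_eq_of_toList {x : String} {l : List Char} (h : x.toList = l) :
    x = String.ofList l := by rw [← h, String.ofList_toList]

theorem pv_slice_from (text : String) (k : Nat) :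
    PySem.Str.slice text (some (k : Int)) none = String.ofList (text.toList.drop k) := by
  apply pv_str_eq_of_toList
  rw [PySem.Str.toList_slice]
  simp [PySem.Chars.slice_eq_listSlice, PySem.List.slice_from_natCast]

theorem pv_slice_nat (text : String) (a b : Nat) :
    PySem.Str.slice text (some (a : Int)) (some (b : Int))
      = String.ofList ((text.toList.drop a).take (b - a)) := by
  apply pv_str_eq_of_toList
  rw [PySem.Str.toList_slice]
  simp [PySem.Chars.slice_eq_listSlice, PySem.List.slice_natCast]

theorem pvGoHtml_eq (cs : List Char) : ∀ buf,
    pvGoHtml cs buf =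
      if PySem.Chars.find cs ['<', '?'] = -1 then
        [("html", String.ofList (buf.reverse ++ cs))]
      else
        ("html", String.ofList (buf.reverse ++ cs.take (PySem.Chars.find cs ['<', '?']).toNat)) ::
        pvGoPhp (cs.drop ((PySem.Chars.find cs ['<', '?']).toNat + 2)) ['?', '<'] := by
  induction cs with
  | nil =>
    intro buf
    rw [if_pos (pv_find_two_ne [] '<' '?' (by simp))]
    simp [pvGoHtml]
  | cons c tail ih =>
    intro buf
    match tail with
    | [] =>
      rw [if_pos (pv_find_two_ne [c] '<' '?' (by simp))]
      simp [pvGoHtml]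
    | c2 :: rest =>
      by_cases hp : c = '<' ∧ c2 = '?'
      · have hpre : ['<', '?'] <+: c :: c2 :: rest := by
          rw [List.cons_prefix_cons]
          exact ⟨hp.1.symm, by rw [List.cons_prefix_cons]; exact ⟨hp.2.symm, List.nil_prefix⟩⟩
        rw [pv_find_of_prefix _ _ hpre]
        simp [pvGoHtml, hp]
      · have hnp : ¬ ['<', '?'] <+: c :: c2 :: rest := by
          rw [List.cons_prefix_cons, List.cons_prefix_cons]
          tauto
        rw [pv_find_cons _ _ _ hnp]
        have hstep : pvGoHtml (c :: c2 :: rest) buf = pvGoHtml (c2 :: rest) (c :: buf) := by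
          simp [pvGoHtml, hp]
        rw [hstep, ih (c :: buf)]
        by_cases hf : PySem.Chars.find (c2 :: rest) ['<', '?'] = -1
        · rw [if_pos hf, if_pos hf, if_pos rfl]
          simp
        · have hf0 : 0 ≤ PySem.Chars.find (c2 :: rest) ['<', '?'] := by
            have := PySem.Chars.neg_one_le_find (c2 :: rest) ['<', '?']; omega
          rw [if_neg hf, if_neg hf, if_neg (by omega)]
          have ht : (PySem.Chars.find (c2 :: rest) ['<', '?'] + 1).toNat
              = (PySem.Chars.find (c2 :: rest) ['<', '?']).toNat + 1 := by omega
          rw [ht]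
          simp [List.take_succ_cons, List.drop_succ_cons]

theorem pvGoPhp_eq (cs : List Char) : ∀ buf,
    pvGoPhp cs buf =
      if PySem.Chars.find cs ['?', '>'] = -1 then
        [("php", String.ofList (buf.reverse ++ cs))]
      else
        ("php", String.ofList (buf.reverse ++ cs.take (PySem.Chars.find cs ['?', '>']).toNat ++ ['?', '>'])) ::
        pvGoHtml (cs.drop ((PySem.Chars.find cs ['?', '>']).toNat + 2)) [] := by
  induction cs with
  | nil =>
    intro buf
    rw [if_pos (pv_find_two_ne [] '?' '>' (by simp))]
    simp [pvGoPhp]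
  | cons c tail ih =>
    intro buf
    match tail with
    | [] =>
      rw [if_pos (pv_find_two_ne [c] '?' '>' (by simp))]
      simp [pvGoPhp]
    | c2 :: rest =>
      by_cases hp : c = '?' ∧ c2 = '>'
      · have hpre : ['?', '>'] <+: c :: c2 :: rest := by
          rw [List.cons_prefix_cons]
          exact ⟨hp.1.symm, by rw [List.cons_prefix_cons]; exact ⟨hp.2.symm, List.nil_prefix⟩⟩
        rw [pv_find_of_prefix _ _ hpre]
        simp [pvGoPhp, hp]
      · have hnp : ¬ ['?', '>'] <+: c :: c2 :: rest := by
          rw [List.cons_prefix_cons, List.cons_prefix_cons]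
          tauto
        rw [pv_find_cons _ _ _ hnp]
        have hstep : pvGoPhp (c :: c2 :: rest) buf = pvGoPhp (c2 :: rest) (c :: buf) := by
          simp [pvGoPhp, hp]
        rw [hstep, ih (c :: buf)]
        by_cases hf : PySem.Chars.find (c2 :: rest) ['?', '>'] = -1
        · rw [if_pos hf, if_pos hf, if_pos rfl]
          simp
        · have hf0 : 0 ≤ PySem.Chars.find (c2 :: rest) ['?', '>'] := by
            have := PySem.Chars.neg_one_le_find (c2 :: rest) ['?', '>']; omega
          rw [if_neg hf, if_neg hf, if_neg (by omega)]
          have ht : (PySem.Chars.find (c2 :: rest) ['?', '>'] + 1).toNat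
              = (PySem.Chars.find (c2 :: rest) ['?', '>']).toNat + 1 := by omega
          rw [ht]
          simp [List.take_succ_cons, List.drop_succ_cons]

theorem pv_loop_eq (text : String) : ∀ (fuel : Nat) (k : Nat),
    k ≤ text.toList.length → text.toList.length - k < fuel →
    pvLoopA text (k : Int) fuel = pvGoHtml (text.toList.drop k) [] := by
  intro fuel
  induction fuel with
  | zero => intro k hk hf; omega
  | succ fuel ih =>
    intro k hk hf
    have hTL : text.toList.length = text.length := String.length_toList
    have hOT : ("<?" : String).toList = ['<', '?'] := by decide
    have hCT : ("?>" : String).toList = ['?', '>'] := by decide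
    have hfindA : PySem.Str.findFrom text "<?" (k : Int) =
        if PySem.Chars.find (text.toList.drop k) ['<', '?'] = -1 then -1
        else (k : Int) + PySem.Chars.find (text.toList.drop k) ['<', '?'] := by
      rw [PySem.Str.findFrom_eq, hOT]
      exact PySem.Chars.findFrom_natCast text.toList ['<', '?'] k hk
    simp only [pvLoopA]
    rw [hfindA]
    by_cases hA : PySem.Chars.find (text.toList.drop k) ['<', '?'] = -1
    · rw [if_pos hA, if_pos rfl, pvGoHtml_eq, if_pos hA, pv_slice_from]
      simp
    · -- "<?" found in the suffix at offset fn, i.e. at absolute position k + fn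
      have hfge : 0 ≤ PySem.Chars.find (text.toList.drop k) ['<', '?'] := by
        have := PySem.Chars.neg_one_le_find (text.toList.drop k) ['<', '?']; omega
      obtain ⟨fn, hfn⟩ : ∃ n : Nat, PySem.Chars.find (text.toList.drop k) ['<', '?'] = (n : Int) :=
        ⟨_, (Int.toNat_of_nonneg hfge).symm⟩
      have hpref : ['<', '?'] <+: (text.toList.drop k).drop fn := by
        have h := (PySem.Chars.find_spec hfge).1
        rw [hfn] at h
        simpa using h
      obtain ⟨t, ht⟩ := hpref
      replace ht := ht.symm
      rw [List.drop_drop] at ht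
      -- ht : List.drop (k + fn) text.toList = ['<','?'] ++ t
      have htd : t = List.drop (k + fn + 2) text.toList := by
        have h := pv_drop_of_prefix text.toList ['<', '?'] t (k + fn) ht
        simpa using h
      have hlen2 : k + fn + 2 ≤ text.toList.length := by
        have h1 : (List.drop (k + fn) text.toList).length = text.toList.length - (k + fn) :=
          List.length_drop
        rw [ht] at h1
        simp at h1
        omega
      simp only [if_neg hA]
      rw [hfn]
      have hstart : ((k : Int) + (fn : Int)) = ((k + fn : Nat) : Int) := by push_cast; ring
      rw [hstart]
      have hfindB : PySem.Str.findFrom text "?>" (((k + fn : Nat) : Int) + 2) =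
          if PySem.Chars.find (text.toList.drop (k + fn + 2)) ['?', '>'] = -1 then -1
          else ((k + fn + 2 : Nat) : Int) + PySem.Chars.find (text.toList.drop (k + fn + 2)) ['?', '>'] := by
        rw [PySem.Str.findFrom_eq, hCT]
        have hc : (((k + fn : Nat) : Int) + 2) = ((k + fn + 2 : Nat) : Int) := by push_cast; ring
        rw [hc]
        exact PySem.Chars.findFrom_natCast text.toList ['?', '>'] (k + fn + 2) hlen2
      rw [hfindB]
      -- right-hand side: one "<?"-step of the state machine
      rw [pvGoHtml_eq]
      rw [hfn]
      rw [if_neg (by omega)]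
      have hdrop2 : (text.toList.drop k).drop (((fn : Int)).toNat + 2) = text.toList.drop (k + fn + 2) := by
        rw [List.drop_drop]
        simp only [Int.toNat_natCast, ← Nat.add_assoc]
      rw [hdrop2]
      by_cases hB : PySem.Chars.find (text.toList.drop (k + fn + 2)) ['?', '>'] = -1
      · -- unclosed "<?": both emit the html piece then the php tail
        rw [if_pos hB, if_pos rfl, pvGoPhp_eq, if_pos hB]
        rw [pv_slice_nat text k (k + fn), pv_slice_from text (k + fn)]
        rw [ht, htd]
        simp
      · -- closed php block; recurse / continue the machine
        have hgge : 0 ≤ PySem.Chars.find (text.toList.drop (k + fn + 2)) ['?', '>'] := by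
          have := PySem.Chars.neg_one_le_find (text.toList.drop (k + fn + 2)) ['?', '>']; omega
        obtain ⟨gn, hgn⟩ : ∃ n : Nat,
            PySem.Chars.find (text.toList.drop (k + fn + 2)) ['?', '>'] = (n : Int) :=
          ⟨_, (Int.toNat_of_nonneg hgge).symm⟩
        have hprefg : ['?', '>'] <+: (text.toList.drop (k + fn + 2)).drop gn := by
          have h := (PySem.Chars.find_spec hgge).1
          rw [hgn] at h
          simpa using h
        obtain ⟨t2, ht2⟩ := hprefg
        replace ht2 := ht2.symm
        rw [List.drop_drop] at ht2
        -- ht2 : List.drop (k + fn + 2 + gn) text.toList = ['?','>'] ++ t2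
        have ht2d : t2 = List.drop (k + fn + 2 + gn + 2) text.toList := by
          have h := pv_drop_of_prefix text.toList ['?', '>'] t2 (k + fn + 2 + gn) ht2
          simpa using h
        have hlen4 : k + fn + 2 + gn + 2 ≤ text.toList.length := by
          have h1 : (List.drop (k + fn + 2 + gn) text.toList).length
              = text.toList.length - (k + fn + 2 + gn) := List.length_drop
          rw [ht2] at h1
          simp at h1
          omega
        simp only [if_neg hB]
        rw [hgn]
        rw [if_neg (by omega)]
        rw [pvGoPhp_eq, hgn, if_neg (by omega)]
        have hend : (((k + fn + 2 : Nat) : Int) + (gn : Int) + 2)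
            = ((k + fn + 2 + gn + 2 : Nat) : Int) := by push_cast; ring
        rw [hend]
        have hrec := ih (k + fn + 2 + gn + 2) hlen4 (by omega)
        rw [hrec]
        have hdrop3 : (text.toList.drop (k + fn + 2)).drop (((gn : Int)).toNat + 2)
            = text.toList.drop (k + fn + 2 + gn + 2) := by
          rw [List.drop_drop]
          simp only [Int.toNat_natCast, ← Nat.add_assoc]
        rw [hdrop3]
        -- remaining: the three emitted pieces coincide
        rw [pv_slice_nat text k (k + fn), pv_slice_nat text (k + fn) (k + fn + 2 + gn + 2)]
        have hphp : (text.toList.drop (k + fn)).take (k + fn + 2 + gn + 2 - (k + fn))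
            = '<' :: '?' :: ((text.toList.drop (k + fn + 2)).take gn ++ ['?', '>']) := by
          rw [ht, htd]
          have hc : k + fn + 2 + gn + 2 - (k + fn) = 2 + (gn + 2) := by omega
          rw [hc, List.take_add, List.take_left' (by simp), List.drop_left' (by simp),
            List.take_add]
          have hdg : List.drop gn (List.drop (k + fn + 2) text.toList) = ['?', '>'] ++ t2 := by
            rw [List.drop_drop]; exact ht2
          rw [hdg, List.take_left' (by simp)]
          simp
        rw [hphp]
        simp

-- ===== VERDICT (by name: the statement is the Claim_ definition above) =====
theorem split_php_blocks_spec : Claim_equal_split_php_blocks := by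
  intro text _
  unfold Spec_split_php_blocks split_php_blocks split_php_blocks_alt
  have h := pv_loop_eq text (text.toList.length + 1) 0 (by omega) (by omega)
  simpa [String.length_toList] using h
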